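-- pv_equiv track=rewrite | github.com/brantonb/golf-fiddling | tools/find_neighbor.py | find_neighbor_matches
-- ===== SOURCE A (Python) =====
-- DIRECTION_OFFSETS = {
--     'N': (-1, 0),   # North (row above)
--     'S': (1, 0),    # South (row below)
--     'E': (0, 1),    # East (column right)
--     'W': (0, -1),   # West (column left)
--     'NE': (-1, 1),  # Northeast
--     'NW': (-1, -1), # Northwest
--     'SE': (1, 1),   # Southeast
--     'SW': (1, -1),  # Southwest
-- }
--
-- def find_neighbor_matches(terrain, tile1, direction, tile2):
--     """
--     Find all positions where tile1 has tile2 as a neighbor in the given direction.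
--
--     Returns list of (row, col) positions where tile1 is found with the relationship.
--     """
--     if direction not in DIRECTION_OFFSETS:
--         raise ValueError(f"Invalid direction: {direction}. Must be one of {list(DIRECTION_OFFSETS.keys())}")
--
--     tile1 = tile1.upper()
--     tile2 = tile2.upper()
--     drow, dcol = DIRECTION_OFFSETS[direction]
--
--     matches = []
--     height = len(terrain)
--
--     for row in range(height):
--         width = len(terrain[row])
--         for col in range(width):
--             # Check if this position has tile1
--             if terrain[row][col] == tile1:
--                 # Check if neighbor position exists and has tile2
--                 neighbor_row = row + drow
--                 neighbor_col = col + dcol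
--
--                 if (0 <= neighbor_row < height and
--                     0 <= neighbor_col < len(terrain[neighbor_row]) and
--                     terrain[neighbor_row][neighbor_col] == tile2):
--                     matches.append((row, col))
--
--     return matches
-- ===== SOURCE B (Python) =====
-- DIRECTION_OFFSETS = {
--     'N': (-1, 0),
--     'S': (1, 0),
--     'E': (0, 1),
--     'W': (0, -1),
--     'NE': (-1, 1),
--     'NW': (-1, -1),
--     'SE': (1, 1),
--     'SW': (1, -1),
-- }
--
-- def find_neighbor_matches(terrain, tile1, direction, tile2):
--     if direction not in DIRECTION_OFFSETS:
--         raise ValueError(f"Invalid direction: {direction}. Must be one of {list(DIRECTION_OFFSETS.keys())}")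
--
--     tile1 = tile1.upper()
--     tile2 = tile2.upper()
--     drow, dcol = DIRECTION_OFFSETS[direction]
--
--     # First pass: set of all in-bounds coordinates holding tile2.
--     tile2_cells = set()
--     for r, row in enumerate(terrain):
--         for c, cell in enumerate(row):
--             if cell == tile2:
--                 tile2_cells.add((r, c))
--
--     # Second pass: row-major scan of tile1 cells, probing the set.
--     return [(r, c)
--             for r, row in enumerate(terrain)
--             for c, cell in enumerate(row)
--             if cell == tile1 and (r + drow, c + dcol) in tile2_cells]
-- ===== Notes on version B (the rewrite author's own statement) =====
-- stated objective: alternative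
-- what changed: Replaces A's inline bounds-check-plus-direct-neighbor comparison with a two-pass design: first build a set of all (row,col) coordinates holding tile2, then emit tile1 positions whose offset neighbor is in that set via a row-major comprehension.
import Mathlib
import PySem

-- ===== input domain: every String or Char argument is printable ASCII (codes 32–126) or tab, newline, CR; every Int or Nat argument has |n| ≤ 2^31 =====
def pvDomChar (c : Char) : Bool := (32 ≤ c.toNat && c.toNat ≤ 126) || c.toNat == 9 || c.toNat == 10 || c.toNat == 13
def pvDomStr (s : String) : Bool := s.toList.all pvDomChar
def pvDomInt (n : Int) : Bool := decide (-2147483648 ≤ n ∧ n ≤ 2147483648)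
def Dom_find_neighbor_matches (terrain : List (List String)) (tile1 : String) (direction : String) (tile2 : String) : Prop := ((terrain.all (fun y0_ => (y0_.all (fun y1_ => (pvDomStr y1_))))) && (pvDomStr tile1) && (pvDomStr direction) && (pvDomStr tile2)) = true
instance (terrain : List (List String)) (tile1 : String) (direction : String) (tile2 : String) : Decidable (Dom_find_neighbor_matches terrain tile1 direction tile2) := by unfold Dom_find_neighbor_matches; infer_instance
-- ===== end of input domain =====

-- B replaces A's inline bounds check + direct neighbor comparison with a first pass collecting
-- all tile2 coordinates into a set, then a row-major comprehension probing that set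
-- (objective: alternative decomposition, same cost).

-- ===== PORT A =====
-- module constant DIRECTION_OFFSETS (shared by both Python modules)
def pvDirectionOffsets : PySem.Dict String (Int × Int) :=
  PySem.Dict.ofList [("N", (-1, 0)), ("S", (1, 0)), ("E", (0, 1)), ("W", (0, -1)),
                     ("NE", (-1, 1)), ("NW", (-1, -1)), ("SE", (1, 1)), ("SW", (1, -1))]

def find_neighbor_matches (terrain : List (List String)) (tile1 : String) (direction : String) (tile2 : String) : List (Int × Int) :=
  match PySem.Dict.get? pvDirectionOffsets direction with
  | none => []  -- Python raises ValueError here; excluded by Pre_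
  | some off =>
    let t1 := PySem.Str.upper tile1
    let t2 := PySem.Str.upper tile2
    let drow := off.1
    let dcol := off.2
    let height : Int := terrain.length
    (PySem.List.pyRange 0 height 1).foldl (fun acc_ row =>
      let width : Int := (PySem.List.pyGetD terrain row []).length
      (PySem.List.pyRange 0 width 1).foldl (fun acc_ col =>
        if PySem.List.pyGetD (PySem.List.pyGetD terrain row []) col "" == t1 then
          let nr := row + drow
          let nc := col + dcol
          if 0 ≤ nr ∧ nr < height ∧ 0 ≤ nc ∧ nc < ((PySem.List.pyGetD terrain nr []).length : Int) ∧
             PySem.List.pyGetD (PySem.List.pyGetD terrain nr []) nc "" == t2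
          then acc_ ++ [(row, col)] else acc_
        else acc_) acc_) []

-- ===== PORT B =====
def find_neighbor_matches_alt (terrain : List (List String)) (tile1 : String) (direction : String) (tile2 : String) : List (Int × Int) :=
  match PySem.Dict.get? pvDirectionOffsets direction with
  | none => []  -- Python raises ValueError here; excluded by Pre_
  | some off =>
    let t1 := PySem.Str.upper tile1
    let t2 := PySem.Str.upper tile2
    let drow := off.1
    let dcol := off.2
    let tile2Cells : PySem.Set (Int × Int) :=
      (PySem.List.enumerate terrain).foldl (fun s p =>
        (PySem.List.enumerate p.2).foldl (fun s q =>
          if q.2 == t2 then PySem.Set.add s (p.1, q.1) else s) s) PySem.Set.empty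
    (PySem.List.enumerate terrain).flatMap (fun p =>
      (PySem.List.enumerate p.2).flatMap (fun q =>
        if q.2 == t1 && tile2Cells.contains (p.1 + drow, q.1 + dcol) then [(p.1, q.1)] else []))

-- ===== PRECONDITION & SPEC =====
-- Pre_ excludes exactly the invalid directions, on which Python A raises ValueError (B raises too).
def Pre_find_neighbor_matches (terrain : List (List String)) (tile1 : String) (direction : String) (tile2 : String) : Prop :=
  direction ∈ (["N", "S", "E", "W", "NE", "NW", "SE", "SW"] : List String)
instance (terrain : List (List String)) (tile1 : String) (direction : String) (tile2 : String) : Decidable (Pre_find_neighbor_matches terrain tile1 direction tile2) := by unfold Pre_find_neighbor_matches; infer_instance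

def pvWitness_find_neighbor_matches : List (List String) × String × String × String :=
  ([["A", "B"], ["B", "A"]], "A", "E", "B")

def Spec_find_neighbor_matches (terrain : List (List String)) (tile1 : String) (direction : String) (tile2 : String) (out : List (Int × Int)) : Prop := out = find_neighbor_matches_alt terrain tile1 direction tile2
instance (terrain : List (List String)) (tile1 : String) (direction : String) (tile2 : String) (out : List (Int × Int)) : Decidable (Spec_find_neighbor_matches terrain tile1 direction tile2 out) := by unfold Spec_find_neighbor_matches; infer_instance

-- ===== CLAIM (what is proved, stated in full; the proofs are below) =====
def Claim_equal_find_neighbor_matches : Prop := ∀ (terrain : List (List String)) (tile1 : String) (direction : String) (tile2 : String), Dom_find_neighbor_matches terrain tile1 direction tile2 → Pre_find_neighbor_matches terrain tile1 direction tile2 → Spec_find_neighbor_matches terrain tile1 direction tile2 (find_neighbor_matches terrain tile1 direction tile2)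

-- ===== LEMMAS AND PROOFS =====

-- membership in a 'for x in l: if P(x): s.add(f(x))' fold
theorem mem_foldl_add_if {α β : Type} [BEq α] [LawfulBEq α] (l : List β) (P : β → Bool) (f : β → α)
    (x : α) : ∀ init : PySem.Set α,
    (x ∈ l.foldl (fun s b => if P b then PySem.Set.add s (f b) else s) init ↔
      x ∈ init ∨ ∃ b ∈ l, P b = true ∧ x = f b) := by
  induction l with
  | nil => intro init; simp
  | cons b bs ih =>
    intro init
    simp only [List.foldl_cons, ih, List.mem_cons]
    by_cases hb : P b = true
    · simp only [hb, if_true, PySem.Set.mem_add]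
      constructor
      · rintro ((h | hx) | ⟨b', hb', ht, hx⟩)
        · exact Or.inl h
        · exact Or.inr ⟨b, Or.inl rfl, hb, hx⟩
        · exact Or.inr ⟨b', Or.inr hb', ht, hx⟩
      · rintro (h | ⟨b', hb' | hb', ht, hx⟩)
        · exact Or.inl (Or.inl h)
        · subst hb'; exact Or.inl (Or.inr hx)
        · exact Or.inr ⟨b', hb', ht, hx⟩
    · simp only [hb]
      constructor
      · rintro (h | ⟨b', hb', ht, hx⟩)
        · exact Or.inl h
        · exact Or.inr ⟨b', Or.inr hb', ht, hx⟩
      · rintro (h | ⟨b', hb' | hb', ht, hx⟩)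
        · exact Or.inl h
        · subst hb'; exact absurd ht hb
        · exact Or.inr ⟨b', hb', ht, hx⟩

-- membership in B's nested tile2-cell-collecting fold
theorem mem_cells {t2 : String} (terrain : List (List String)) (x : Int × Int) :
    ∀ (init : PySem.Set (Int × Int)) (s0 : Int),
    (x ∈ (PySem.List.enumerate terrain s0).foldl (fun s p =>
        (PySem.List.enumerate p.2).foldl (fun s q =>
          if q.2 == t2 then PySem.Set.add s (p.1, q.1) else s) s) init ↔
      x ∈ init ∨ ∃ p ∈ PySem.List.enumerate terrain s0, ∃ q ∈ PySem.List.enumerate p.2 (0 : Int),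
        q.2 == t2 ∧ x = (p.1, q.1)) := by
  induction terrain with
  | nil => intro init s0; simp [PySem.List.enumerate_nil]
  | cons row rows ih =>
    intro init s0
    simp only [PySem.List.enumerate_cons, List.foldl_cons, ih, List.mem_cons]
    rw [mem_foldl_add_if (PySem.List.enumerate row 0) (fun q => q.2 == t2)
      (fun q => ((s0, row).1, q.1)) x init]
    constructor
    · rintro ((h | ⟨q, hq, ht, hx⟩) | ⟨p, hp, q, hq, ht, hx⟩)
      · exact Or.inl h
      · exact Or.inr ⟨(s0, row), Or.inl rfl, q, hq, ht, hx⟩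
      · exact Or.inr ⟨p, Or.inr hp, q, hq, ht, hx⟩
    · rintro (h | ⟨p, hp | hp, q, hq, ht, hx⟩)
      · exact Or.inl (Or.inl h)
      · subst hp; exact Or.inl (Or.inr ⟨q, hq, ht, hx⟩)
      · exact Or.inr ⟨p, hp, q, hq, ht, hx⟩

-- index-form characterization of the tile2-cell set
theorem cells_contains {t2 : String} (terrain : List (List String)) (nr nc : Int) :
    (PySem.Set.contains
      ((PySem.List.enumerate terrain).foldl (fun s p =>
        (PySem.List.enumerate p.2).foldl (fun s q =>
          if q.2 == t2 then PySem.Set.add s (p.1, q.1) else s) s) PySem.Set.empty)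
      (nr, nc)) = true ↔
    ∃ (r : Nat), ∃ (hr : r < terrain.length), ∃ (c : Nat), ∃ (hc : c < terrain[r].length),
      nr = r ∧ nc = c ∧ terrain[r][c] = t2 := by
  rw [PySem.Set.contains_iff, mem_cells terrain (nr, nc) PySem.Set.empty 0]
  simp only [PySem.Set.empty, List.not_mem_nil, false_or]
  constructor
  · rintro ⟨p, hp, q, hq, ht, hx⟩
    rw [PySem.List.mem_enumerate_iff] at hp
    obtain ⟨r, hr, rfl⟩ := hp
    rw [PySem.List.mem_enumerate_iff] at hq
    obtain ⟨c, hc, rfl⟩ := hq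
    refine ⟨r, hr, c, hc, ?_, ?_, by simpa using ht⟩
    · simpa using congrArg Prod.fst hx
    · simpa using congrArg Prod.snd hx
  · rintro ⟨r, hr, c, hc, rfl, rfl, ht⟩
    refine ⟨((0 : Int) + r, terrain[r]), ?_, ((0 : Int) + c, terrain[r][c]), ?_, by simpa using ht, by simp⟩
    · rw [PySem.List.mem_enumerate_iff]; exact ⟨r, hr, rfl⟩
    · rw [PySem.List.mem_enumerate_iff]; exact ⟨c, hc, rfl⟩

-- A's inline bounds-check condition agrees with membership in B's set
theorem cond_agree {t2 : String} (terrain : List (List String)) (nr nc : Int) :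
    (decide (0 ≤ nr ∧ nr < (terrain.length : Int) ∧ 0 ≤ nc ∧
        nc < ((PySem.List.pyGetD terrain nr []).length : Int) ∧
        PySem.List.pyGetD (PySem.List.pyGetD terrain nr []) nc "" == t2)) =
    PySem.Set.contains
      ((PySem.List.enumerate terrain).foldl (fun s p =>
        (PySem.List.enumerate p.2).foldl (fun s q =>
          if q.2 == t2 then PySem.Set.add s (p.1, q.1) else s) s) PySem.Set.empty)
      (nr, nc) := by
  by_cases h : (0 ≤ nr ∧ nr < (terrain.length : Int) ∧ 0 ≤ nc ∧
      nc < ((PySem.List.pyGetD terrain nr []).length : Int) ∧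
      PySem.List.pyGetD (PySem.List.pyGetD terrain nr []) nc "" == t2)
  · obtain ⟨h1, h2, h3, h4, h5⟩ := h
    have h4' := h4
    have h5' := h5
    rw [PySem.List.pyGetD_of_nonneg _ _ h1] at h4' h5'
    have hr : nr.toNat < terrain.length := by omega
    rw [List.getD_eq_getElem _ _ hr] at h4' h5'
    rw [PySem.List.pyGetD_of_nonneg _ _ h3] at h5'
    have hc : nc.toNat < terrain[nr.toNat].length := by omega
    rw [List.getD_eq_getElem _ _ hc] at h5'
    have hcon := (cells_contains (t2 := t2) terrain nr nc).mpr
      ⟨nr.toNat, hr, nc.toNat, hc, by omega, by omega, by simpa using h5'⟩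
    rw [hcon, decide_eq_true_eq]
    exact ⟨h1, h2, h3, h4, h5⟩
  · rw [decide_eq_false h]
    symm
    rw [Bool.eq_false_iff]
    intro hcon
    apply h
    obtain ⟨r, hr, c, hc, rfl, rfl, ht⟩ := (cells_contains (t2 := t2) terrain nr nc).mp hcon
    refine ⟨by positivity, by exact_mod_cast hr, by positivity, ?_, ?_⟩
    · rw [PySem.List.pyGetD_natCast terrain r, List.getD_eq_getElem _ _ hr]; exact_mod_cast hc
    · rw [PySem.List.pyGetD_natCast terrain r, List.getD_eq_getElem _ _ hr,
        PySem.List.pyGetD_natCast terrain[r] c, List.getD_eq_getElem _ _ hc]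
      simpa using ht

-- (filter then map) is (flatMap of an if-singleton)
theorem filter_map_eq_flatMap {α β : Type} (p : α → Bool) (f : α → β) (l : List α) :
    (l.filter p).map f = l.flatMap (fun x => if p x then [f x] else []) := by
  induction l with
  | nil => rfl
  | cons a l ih => by_cases h : p a <;> simp [h, ih]

-- ===== VERDICT (by name: the statement is the Claim_ definition above) =====
theorem find_neighbor_matches_spec : Claim_equal_find_neighbor_matches := by
  intro terrain tile1 direction tile2 _hdom _hpre
  unfold Spec_find_neighbor_matches
  cases hdir : PySem.Dict.get? pvDirectionOffsets direction with
  | none => simp only [find_neighbor_matches, find_neighbor_matches_alt, hdir]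
  | some off =>
    simp only [find_neighbor_matches, find_neighbor_matches_alt, hdir]
    set t1 := PySem.Str.upper tile1 with ht1
    set t2 := PySem.Str.upper tile2 with ht2
    set cells := (PySem.List.enumerate terrain).foldl (fun s p =>
        (PySem.List.enumerate p.2).foldl (fun s q =>
          if q.2 == t2 then PySem.Set.add s (p.1, q.1) else s) s) PySem.Set.empty with hcells
    -- A side: nested ifs → single boolean test; append-fold → filter/map → flatMap
    have hA : ∀ (acc : List (Int × Int)) (row : Int),
        (PySem.List.pyRange 0 ((PySem.List.pyGetD terrain row []).length : Int) 1).foldl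
          (fun acc_ col =>
            if PySem.List.pyGetD (PySem.List.pyGetD terrain row []) col "" == t1 then
              if 0 ≤ row + off.1 ∧ row + off.1 < (terrain.length : Int) ∧ 0 ≤ col + off.2 ∧
                 col + off.2 < ((PySem.List.pyGetD terrain (row + off.1) []).length : Int) ∧
                 PySem.List.pyGetD (PySem.List.pyGetD terrain (row + off.1) []) (col + off.2) "" == t2
              then acc_ ++ [(row, col)] else acc_
            else acc_) acc =
        acc ++ (PySem.List.pyRange 0 ((PySem.List.pyGetD terrain row []).length : Int) 1).flatMap
          (fun col => if (PySem.List.pyGetD (PySem.List.pyGetD terrain row []) col "" == t1) &&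
              PySem.Set.contains cells (row + off.1, col + off.2)
            then [(row, col)] else []) := by
      intro acc row
      have hpt : ∀ (acc_ : List (Int × Int)) (col : Int),
          (if PySem.List.pyGetD (PySem.List.pyGetD terrain row []) col "" == t1 then
            if 0 ≤ row + off.1 ∧ row + off.1 < (terrain.length : Int) ∧ 0 ≤ col + off.2 ∧
               col + off.2 < ((PySem.List.pyGetD terrain (row + off.1) []).length : Int) ∧
               PySem.List.pyGetD (PySem.List.pyGetD terrain (row + off.1) []) (col + off.2) "" == t2
            then acc_ ++ [(row, col)] else acc_
          else acc_) =
          (if ((PySem.List.pyGetD (PySem.List.pyGetD terrain row []) col "" == t1) &&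
              PySem.Set.contains cells (row + off.1, col + off.2)) = true
          then acc_ ++ [(row, col)] else acc_) := by
        intro acc_ col
        rw [hcells, ← cond_agree (t2 := t2) terrain (row + off.1) (col + off.2)]
        by_cases h1 : (PySem.List.pyGetD (PySem.List.pyGetD terrain row []) col "" == t1) = true <;>
          by_cases h2 : (0 ≤ row + off.1 ∧ row + off.1 < (terrain.length : Int) ∧ 0 ≤ col + off.2 ∧
            col + off.2 < ((PySem.List.pyGetD terrain (row + off.1) []).length : Int) ∧
            PySem.List.pyGetD (PySem.List.pyGetD terrain (row + off.1) []) (col + off.2) "" == t2) <;>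
          simp [h1, h2]
      rw [PySem.List.foldl_congr_mem _ _ _ _ (fun acc_ => fun col _ => hpt acc_ col),
        PySem.List.foldl_append_if
          (fun col => (PySem.List.pyGetD (PySem.List.pyGetD terrain row []) col "" == t1) &&
            PySem.Set.contains cells (row + off.1, col + off.2))
          (fun col => ((row, col) : Int × Int)),
        filter_map_eq_flatMap]
    rw [PySem.List.foldl_congr_mem _ _ _ _ (fun acc => fun row _ => hA acc row),
      PySem.List.foldl_append_eq_flatMap]
    -- B side: enumerate → pyRange/pyGetD form
    rw [PySem.List.enumerate_eq_map_pyRange terrain ([] : List String), List.flatMap_map]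
    simp only [List.nil_append, PySem.List.len]
    apply List.flatMap_congr
    intro row _
    rw [PySem.List.enumerate_eq_map_pyRange (PySem.List.pyGetD terrain row []) "", List.flatMap_map]
    rfl
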